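-- pv_equiv track=rewrite | github.com/coding0101s/makelog | v0.1/mklog.py | is_string
-- ===== SOURCE A (Python) =====
-- def is_string(code: str):
--     end_idx = 0
--     tmp_idx = 1
--
--     if code[0] == '"':
--         code = code[1:]
--         for ch in code:
--             if ch == '"':
--                 end_idx += tmp_idx
--                 break
--             tmp_idx += 1
--
--     return end_idx != 0 and end_idx == len(code)
-- ===== SOURCE B (Python) =====
-- def is_string(code: str):
--     return code[0] == '"' and len(code) >= 2 and code[-1] == '"' and '"' not in code[1:-1]
-- ===== Notes on version B (the rewrite author's own statement) =====
-- stated objective: idiomatic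
-- what changed: A strips the opening quote and scans with an index counter to find the first closing quote's position; B tests the string's shape directly as one conjunction: first char is a quote, length at least 2, last char is a quote, and no quote in the interior slice.
import Mathlib
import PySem

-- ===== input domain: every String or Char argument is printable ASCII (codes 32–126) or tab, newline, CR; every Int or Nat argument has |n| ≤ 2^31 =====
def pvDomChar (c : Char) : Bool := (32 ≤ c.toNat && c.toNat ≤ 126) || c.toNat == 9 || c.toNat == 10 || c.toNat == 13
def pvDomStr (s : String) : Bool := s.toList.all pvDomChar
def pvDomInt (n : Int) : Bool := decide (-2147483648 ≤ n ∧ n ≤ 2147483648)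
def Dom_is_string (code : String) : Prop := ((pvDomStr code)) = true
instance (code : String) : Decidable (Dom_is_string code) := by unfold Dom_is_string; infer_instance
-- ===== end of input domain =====

-- B replaces A's strip-then-scan index-counter loop with a direct shape test (first char, length, last char, interior membership); same cost, more idiomatic.

-- ===== PORT A =====
-- the 'for ch in code: …' loop of A, carrying end_idx and tmp_idx
def isStringLoopA : List Char → Int → Int → Int
  | [], e, _ => e
  | c :: cs, e, t => if c = '"' then e + t else isStringLoopA cs e (t + 1)

def is_string (code : String) : Bool :=
  let cs := code.toList
  match cs with
  | [] => false  -- Python raises IndexError here; excluded by Pre_is_string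
  | c0 :: rest =>
    if c0 = '"' then
      let e := isStringLoopA rest 0 1
      decide (e ≠ 0 ∧ e = (rest.length : Int))
    else
      decide ((0 : Int) ≠ 0 ∧ (0 : Int) = (cs.length : Int))

-- ===== PORT B =====
def is_string_alt (code : String) : Bool :=
  let cs := code.toList
  match PySem.List.pyGet? cs 0 with
  | none => false  -- Python raises IndexError here; excluded by Pre_is_string
  | some c0 =>
    (c0 = '"' : Bool) && decide (2 ≤ cs.length)
      && (PySem.List.pyGet? cs (-1) == some '"')
      && !((PySem.List.slice cs (some 1) (some (-1))).contains '"')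

-- ===== PRECONDITION & SPEC =====
-- Pre_ excludes only the empty string, on which Python A (and B) raise IndexError at code[0].
def Pre_is_string (code : String) : Prop := code.toList ≠ []
instance (code : String) : Decidable (Pre_is_string code) := by unfold Pre_is_string; infer_instance
def pvWitness_is_string : String := "\"ab\""

def Spec_is_string (code : String) (out : Bool) : Prop := out = is_string_alt code
instance (code : String) (out : Bool) : Decidable (Spec_is_string code out) := by unfold Spec_is_string; infer_instance

-- ===== CLAIM (what is proved, stated in full; the proofs are below) =====
def Claim_equal_is_string : Prop := ∀ (code : String), Dom_is_string code → Pre_is_string code → Spec_is_string code (is_string code)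

-- ===== LEMMAS AND PROOFS =====

-- core invariant: A's quote-position test equals B's last-char/interior test, for any start counter t ≥ 1
lemma loop_gen (rest : List Char) (t : Int) (ht : 1 ≤ t) :
    decide (isStringLoopA rest 0 t ≠ 0 ∧ isStringLoopA rest 0 t = (rest.length : Int) + t - 1)
      = ((rest.getLast? == some '"') && !(rest.dropLast.contains '"')) := by
  induction rest generalizing t with
  | nil => simp [isStringLoopA]
  | cons c cs ih =>
    by_cases hc : c = '"'
    · subst hc
      cases cs with
      | nil => simp [isStringLoopA]; omega
      | cons d ds =>
        simp [isStringLoopA, List.getLast?_cons, List.dropLast]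
        intro _; omega
    · have h1 : isStringLoopA (c :: cs) 0 t = isStringLoopA cs 0 (t + 1) := by
        simp [isStringLoopA, hc]
      rw [h1]
      have h2 := ih (t + 1) (by omega)
      cases cs with
      | nil =>
        simp [isStringLoopA, hc]
      | cons d ds =>
        have hlast : (c :: d :: ds).getLast? = (d :: ds).getLast? := by
          simp [List.getLast?_cons]
        have hdrop : (c :: d :: ds).dropLast = c :: (d :: ds).dropLast := by
          simp [List.dropLast]
        rw [hlast, hdrop]
        have hcont : (c :: (d :: ds).dropLast).contains '"' = (d :: ds).dropLast.contains '"' := by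
          simp only [List.contains_cons, Bool.or_eq_right_iff_imp, beq_iff_eq]
          intro h; exact absurd h.symm hc
        rw [hcont]
        have harith : ((c :: d :: ds).length : Int) + t - 1 = ((d :: ds).length : Int) + (t + 1) - 1 := by
          simp only [List.length_cons]; push_cast; ring
        rw [harith]
        exact h2

-- code[1:-1] on the list side: drop the head, drop the last
lemma slice_one_negone {α : Type} (xs : List α) :
    PySem.List.slice xs (some 1) (some (-1)) = xs.tail.dropLast := by
  simp only [PySem.List.slice, PySem.List.clampIdx, Int.reduceNeg, Int.neg_neg_iff_pos, zero_lt_one, ↓reduceIte,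
    add_neg_lt_iff_lt_add, zero_add, Nat.cast_lt_one, List.length_eq_zero_iff, Int.reduceLT, Int.toNat_one]
  cases xs with
  | nil => simp
  | cons a l =>
    simp only [List.tail_cons, if_neg (by simp : ¬(a :: l = []))]
    rw [List.dropLast_eq_take]
    simp only [List.length_cons]
    have h1 : ((↑(l.length + 1) + (-1 : Int))).toNat = l.length := by omega
    rw [h1]
    have h2 : min 1 (l.length + 1) = 1 := by omega
    rw [h2]
    simp

-- ===== VERDICT (by name: the statement is the Claim_ definition above) =====
theorem is_string_spec : Claim_equal_is_string := by
  intro code _ hpre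
  unfold Spec_is_string is_string is_string_alt
  cases hcs : code.toList with
  | nil => exact absurd hcs hpre
  | cons c0 rest =>
    have hget0 : PySem.List.pyGet? (c0 :: rest) 0 = some c0 := by simp [pysem]
    dsimp only
    rw [hget0]
    by_cases hc0 : c0 = '"'
    · simp only [hc0]
      have hg := loop_gen rest 1 (le_refl 1)
      have hlen : ((rest.length : Int) + 1 - 1) = (rest.length : Int) := by omega
      rw [hlen] at hg
      rw [hg]
      -- now relate B's conjuncts on cs = '"' :: rest
      cases rest with
      | nil => decide
      | cons d ds =>
        have hlast : PySem.List.pyGet? ('"' :: d :: ds) (-1) = ('"' :: d :: ds).getLast? := by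
          simp [pysem]
          rw [List.getLast?_eq_getElem?]
          simp
          rfl
        have hslice : PySem.List.slice ('"' :: d :: ds) (some 1) (some (-1))
            = (d :: ds).dropLast := slice_one_negone _
        rw [hlast, hslice]
        simp [List.getLast?_cons]
    · simp [hc0]
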